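-- pv_equiv track=rewrite | github.com/pybitboo/StringMatching | StringMatching/matcher.py | __last_chars
-- ===== SOURCE A (Python) =====
-- def __last_chars(pattern):
--     last_chars = dict()
--
--     for i in range(1, len(pattern)):
--         chars = dict()
--
--         for j in range(i):
--             chars[pattern[j]] = j
--
--         last_chars[i] = chars
--
--     return last_chars
-- ===== SOURCE B (Python) =====
-- def __last_chars(pattern):
--     last_chars = dict()
--     running = dict()
--
--     for i in range(1, len(pattern)):
--         running[pattern[i - 1]] = i - 1
--         last_chars[i] = dict(running)
--
--     return last_chars
-- ===== Notes on version B (the rewrite author's own statement) =====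
-- stated objective: faster
-- what changed: Instead of rebuilding each prefix dict from scratch with an inner loop, B maintains one running char-to-last-index dict and snapshots a copy of it per step, turning the nested O(n^2) rebuild into a single accumulating pass (output copies still cost O(size) each).
import Mathlib
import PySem

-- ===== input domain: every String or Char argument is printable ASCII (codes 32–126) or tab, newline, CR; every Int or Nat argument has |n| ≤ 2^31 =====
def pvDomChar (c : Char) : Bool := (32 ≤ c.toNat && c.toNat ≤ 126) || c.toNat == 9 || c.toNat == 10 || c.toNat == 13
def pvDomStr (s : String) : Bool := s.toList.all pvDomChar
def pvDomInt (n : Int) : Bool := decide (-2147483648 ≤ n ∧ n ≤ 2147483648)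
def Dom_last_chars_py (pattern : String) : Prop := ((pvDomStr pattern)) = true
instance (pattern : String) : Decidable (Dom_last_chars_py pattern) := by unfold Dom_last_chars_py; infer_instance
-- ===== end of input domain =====

-- B replaces A's per-index rebuild-from-scratch of each prefix dict by one running
-- dict that is extended by a single insert per step and snapshotted (copied) into the
-- result; objective: faster (constant-factor: the inner rebuild loop disappears).


-- pattern[j] as a 1-char Python string (indices used by both programs are always in range)
def pvCharAt (pattern : String) (j : Int) : String :=
  String.ofList [PySem.List.pyGetD pattern.toList j ' ']

-- ===== PORT A =====
-- for i in range(1, len(pattern)): rebuild chars from scratch over j in range(i)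
def last_chars_py (pattern : String) : List (Int × List (String × Int)) :=
  let outer : PySem.Dict Int (PySem.Dict String Int) :=
    (PySem.List.pyRange 1 (PySem.Str.len pattern) 1).foldl
      (fun d i =>
        d.insert i
          ((PySem.List.pyRange 0 i 1).foldl
            (fun (chars : PySem.Dict String Int) j =>
              chars.insert (pvCharAt pattern j) j)
            PySem.Dict.empty))
      PySem.Dict.empty
  outer.items.map (fun p => (p.1, p.2.items))

-- ===== PORT B =====
-- one running dict, extended by a single insert per step and snapshotted into last_chars
def last_chars_py_alt (pattern : String) : List (Int × List (String × Int)) :=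
  let st : PySem.Dict String Int × PySem.Dict Int (PySem.Dict String Int) :=
    (PySem.List.pyRange 1 (PySem.Str.len pattern) 1).foldl
      (fun st i =>
        let running := st.1.insert (pvCharAt pattern (i - 1)) (i - 1)
        (running, st.2.insert i running))
      (PySem.Dict.empty, PySem.Dict.empty)
  st.2.items.map (fun p => (p.1, p.2.items))

-- ===== PRECONDITION & SPEC =====
def Spec_last_chars_py (pattern : String) (out : List (Int × List (String × Int))) : Prop := out = last_chars_py_alt pattern
instance (pattern : String) (out : List (Int × List (String × Int))) : Decidable (Spec_last_chars_py pattern out) := by unfold Spec_last_chars_py; infer_instance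

-- ===== CLAIM (what is proved, stated in full; the proofs are below) =====
def Claim_equal_last_chars_py : Prop := ∀ (pattern : String), Dom_last_chars_py pattern → Spec_last_chars_py pattern (last_chars_py pattern)

-- ===== LEMMAS AND PROOFS =====

-- chars for prefix length k: the dict A's inner loop builds for i = k
def pvChars (pattern : String) (k : Int) : PySem.Dict String Int :=
  (PySem.List.pyRange 0 k 1).foldl
    (fun (chars : PySem.Dict String Int) j => chars.insert (pvCharAt pattern j) j)
    PySem.Dict.empty

theorem pvChars_succ (pattern : String) (m : Nat) :
    pvChars pattern ((m : Int) + 1)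
      = (pvChars pattern m).insert (pvCharAt pattern m) m := by
  unfold pvChars
  rw [PySem.List.pyRange_one_succ_right (by exact_mod_cast Nat.zero_le m), List.foldl_append]
  rfl

theorem pv_fold_invariant (pattern : String) (m : Nat) :
    (PySem.List.pyRange 1 (1 + (m : Int)) 1).foldl
      (fun (st : PySem.Dict String Int × PySem.Dict Int (PySem.Dict String Int)) i =>
        let running := st.1.insert (pvCharAt pattern (i - 1)) (i - 1)
        (running, st.2.insert i running))
      (PySem.Dict.empty, PySem.Dict.empty)
    = (pvChars pattern m,
       (PySem.List.pyRange 1 (1 + (m : Int)) 1).foldl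
         (fun d i =>
           d.insert i
             ((PySem.List.pyRange 0 i 1).foldl
               (fun (chars : PySem.Dict String Int) j =>
                 chars.insert (pvCharAt pattern j) j)
               PySem.Dict.empty))
         PySem.Dict.empty) := by
  induction m with
  | zero =>
      simp [PySem.List.pyRange_one_eq_nil (by omega : (1 : Int) ≤ 1), pvChars,
        PySem.List.pyRange_one_eq_nil (by omega : (0 : Int) ≤ 0)]
  | succ m ih =>
      have hsplit : PySem.List.pyRange 1 (1 + ((m : Int) + 1)) 1
          = PySem.List.pyRange 1 (1 + (m : Int)) 1 ++ [1 + (m : Int)] := by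
        have := PySem.List.pyRange_one_succ_right (a := 1) (b := 1 + (m : Int))
          (by omega)
        rw [show (1 : Int) + ((m : Int) + 1) = 1 + (m : Int) + 1 by ring, this]
      push_cast
      rw [hsplit, List.foldl_append, List.foldl_append, ih]
      simp only [List.foldl_cons, List.foldl_nil]
      have h1 : (1 : Int) + (m : Int) - 1 = (m : Int) := by ring
      have h2 : pvChars pattern ((m : Int) + 1)
          = (pvChars pattern m).insert (pvCharAt pattern m) m := pvChars_succ pattern m
      have h3 : (PySem.List.pyRange 0 (1 + (m : Int)) 1).foldl
          (fun (chars : PySem.Dict String Int) j =>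
            chars.insert (pvCharAt pattern j) j) PySem.Dict.empty
          = pvChars pattern ((m : Int) + 1) := by
        unfold pvChars
        rw [show (1 : Int) + (m : Int) = (m : Int) + 1 by ring]
      simp only [h1, h3, h2]

-- ===== VERDICT (by name: the statement is the Claim_ definition above) =====
theorem last_chars_py_spec : Claim_equal_last_chars_py := by
  intro pattern _
  unfold Spec_last_chars_py last_chars_py last_chars_py_alt
  have hn : PySem.Str.len pattern = ((pattern.toList.length : Nat) : Int) := by
    simp [PySem.Str.len_eq]
  cases hL : pattern.toList.length with
  | zero =>
      simp [hL, PySem.List.pyRange_one_eq_nil (by omega : (0 : Int) ≤ 1)]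
  | succ m =>
      have : PySem.Str.len pattern = 1 + (m : Int) := by
        rw [hn, hL]; push_cast; ring
      rw [this, pv_fold_invariant pattern m]
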